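-- pv_equiv track=rewrite | github.com/sumini0516/cs224n_2021 | ass1.py | distinct_words
-- ===== SOURCE A (Python) =====
-- def distinct_words(corpus):
--     """ Determine a list of distinct words for the corpus.
--             Params:
--                 corpus (list of list of strings): corpus of documents
--             Return:
--                 corpus_words (list of strings): sorted list of distinct words across the corpus
--                 num_corpus_words (integer): number of distinct words across the corpus
--     """
--     corpus_words = []
--     num_corpus_words = -1
--     for sentence in corpus:
--         for word in sentence:
--             if word not in corpus_words:
--                 corpus_words.append(word)
--             else:
--                 continue
--     corpus_words = sorted(corpus_words)
--     num_corpus_words = len(corpus_words)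
--     return corpus_words, num_corpus_words
-- ===== SOURCE B (Python) =====
-- def distinct_words(corpus):
--     """Sort the full flattened word list, then drop consecutive duplicates in one pass."""
--     words = sorted(w for sentence in corpus for w in sentence)
--     out = []
--     for w in words:
--         if not out or w != out[-1]:
--             out.append(w)
--     return out, len(out)
-- ===== Notes on version B (the rewrite author's own statement) =====
-- stated objective: faster
-- what changed: Instead of an O(n^2) membership test while appending followed by a sort, B sorts the flattened word list first and removes duplicates in a single linear pass comparing each word to the previous one.
import Mathlib
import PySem

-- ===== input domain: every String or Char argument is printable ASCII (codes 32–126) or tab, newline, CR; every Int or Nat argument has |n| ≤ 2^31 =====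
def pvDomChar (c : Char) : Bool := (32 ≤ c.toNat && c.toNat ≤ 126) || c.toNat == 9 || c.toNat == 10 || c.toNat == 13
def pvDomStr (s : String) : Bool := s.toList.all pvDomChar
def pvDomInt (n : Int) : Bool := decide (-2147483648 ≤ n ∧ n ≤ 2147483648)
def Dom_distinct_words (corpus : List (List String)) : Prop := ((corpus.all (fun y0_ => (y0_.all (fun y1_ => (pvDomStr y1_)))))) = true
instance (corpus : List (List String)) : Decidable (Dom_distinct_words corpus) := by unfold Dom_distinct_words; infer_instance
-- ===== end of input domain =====

-- B sorts the flattened word list first and removes consecutive duplicates in one linear pass,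
-- replacing A's quadratic membership-test-while-appending; equivalence of the return values is proved below.

-- ===== PORT A =====
def distinct_words (corpus : List (List String)) : List String × Int :=
  let corpus_words : List String :=
    corpus.foldl (fun acc sentence =>
      sentence.foldl (fun ws word =>
        if ws.contains word then ws else ws ++ [word]) acc) []
  let sortedWords := PySem.List.sorted corpus_words (fun x => x) false
  (sortedWords, (sortedWords.length : Int))

-- ===== PORT B =====
-- the scan keeps its accumulator reversed (append at the head = Python's out.append / out[-1]) and reverses at the end
def dwStep (acc : List String) (w : String) : List String :=
  match acc with
  | [] => [w]
  | h :: _ => if w == h then acc else w :: acc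

def distinct_words_alt (corpus : List (List String)) : List String × Int :=
  let words := PySem.List.sorted (corpus.flatMap (fun s => s)) (fun x => x) false
  let out := (words.foldl dwStep []).reverse
  (out, (out.length : Int))

-- ===== PRECONDITION & SPEC =====
def Spec_distinct_words (corpus : List (List String)) (out : List String × Int) : Prop := out = distinct_words_alt corpus
instance (corpus : List (List String)) (out : List String × Int) : Decidable (Spec_distinct_words corpus out) := by unfold Spec_distinct_words; infer_instance

-- ===== CLAIM (what is proved, stated in full; the proofs are below) =====
def Claim_equal_distinct_words : Prop := ∀ (corpus : List (List String)), Dom_distinct_words corpus → Spec_distinct_words corpus (distinct_words corpus)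

-- ===== LEMMAS AND PROOFS =====

-- A's nested loop over sentences is the fold of PySem.Set.add over the flattened corpus
theorem dw_A_fold_eq (corpus : List (List String)) (init : List String) :
    corpus.foldl (fun acc sentence =>
      sentence.foldl (fun ws word =>
        if ws.contains word then ws else ws ++ [word]) acc) init
    = (corpus.flatMap (fun s => s)).foldl (fun ws word =>
        if ws.contains word then ws else ws ++ [word]) init := by
  induction corpus generalizing init with
  | nil => rfl
  | cons s rest ih =>
    simp only [List.foldl_cons, List.flatMap_cons, List.foldl_append]
    exact ih _

-- invariant of B's scan: over a ≤-sorted input, with a strictly decreasing accumulator whose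
-- head bounds the remaining input from below, the result is strictly decreasing and has
-- exactly the elements of acc and of the input
theorem dwStep_invariant (xs : List String) :
    ∀ (acc : List String),
      acc.Pairwise (fun a b => b < a) →
      xs.Pairwise (fun a b => a ≤ b) →
      (∀ a ∈ acc, ∀ b ∈ xs, a ≤ b) →
      (xs.foldl dwStep acc).Pairwise (fun a b => b < a) ∧
      (∀ a, a ∈ xs.foldl dwStep acc ↔ a ∈ acc ∨ a ∈ xs) := by
  induction xs with
  | nil => intro acc h1 _ _; exact ⟨h1, fun a => by simp⟩
  | cons x rest ih =>
    intro acc h1 h2 h3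
    have h2' : rest.Pairwise (fun a b => a ≤ b) := h2.of_cons
    have hxle : ∀ b ∈ rest, x ≤ b := fun b hb => List.rel_of_pairwise_cons h2 hb
    match hacc : acc with
    | [] =>
      have this := ih [x] (by simp) h2'
        (by intro a ha b hb; simp at ha; subst ha; exact hxle b hb)
      have hstep : dwStep [] x = [x] := rfl
      rw [List.foldl_cons, hstep]
      refine ⟨this.1, fun a => ?_⟩
      rw [this.2 a]
      simp only [List.mem_cons, List.not_mem_nil]
      tauto
    | h :: t =>
      have hhx : h ≤ x := h3 h (by simp) x (by simp)
      by_cases hxeq : x = h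
      · have hstep : dwStep (h :: t) x = h :: t := by simp [dwStep, hxeq]
        have this := ih (h :: t) h1 h2'
          (by intro a ha b hb; exact h3 a ha b (by simp [hb]))
        rw [List.foldl_cons, hstep]
        refine ⟨this.1, fun a => ?_⟩
        rw [this.2 a]
        subst hxeq
        simp only [List.mem_cons]
        tauto
      · have hlt : h < x := lt_of_le_of_ne hhx (fun e => hxeq e.symm)
        have hstep : dwStep (h :: t) x = x :: h :: t := by
          simp only [dwStep, beq_iff_eq, if_neg hxeq]
        have hpw : (x :: h :: t).Pairwise (fun a b => b < a) := by
          refine List.Pairwise.cons ?_ h1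
          intro b hb
          rcases List.mem_cons.mp hb with rfl | hb
          · exact hlt
          · exact (List.rel_of_pairwise_cons h1 hb).trans hlt
        have hbound : ∀ a ∈ (x :: h :: t), ∀ b ∈ rest, a ≤ b := by
          intro a ha b hb
          rcases List.mem_cons.mp ha with rfl | ha
          · exact hxle b hb
          · exact (h3 a ha x (by simp)).trans (hxle b hb)
        have this := ih (x :: h :: t) hpw h2' hbound
        rw [List.foldl_cons, hstep]
        refine ⟨this.1, fun a => ?_⟩
        rw [this.2 a]
        simp only [List.mem_cons]
        tauto

theorem distinct_words_spec : Claim_equal_distinct_words := by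
  intro corpus _
  unfold Spec_distinct_words distinct_words distinct_words_alt
  set flat := corpus.flatMap (fun s => s) with hflat
  have hA : corpus.foldl (fun acc sentence =>
      sentence.foldl (fun ws word =>
        if ws.contains word then ws else ws ++ [word]) acc) []
      = PySem.Set.ofList flat := by
    rw [dw_A_fold_eq]; rfl
  -- B's deduplicated list
  set sws := PySem.List.sorted flat (fun x => x) false with hsws
  have hsort_pw : sws.Pairwise (fun a b => a ≤ b) := by
    simpa using PySem.List.sorted_pairwise flat (fun x => x)
  have inv := dwStep_invariant sws [] (by simp) hsort_pw (by simp)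
  set r := (sws.foldl dwStep []).reverse with hr
  have hrpw : r.Pairwise (fun a b => a < b) := by
    rw [hr, List.pairwise_reverse]; exact inv.1
  have hrmem : ∀ a, a ∈ r ↔ a ∈ flat := by
    intro a
    rw [hr, List.mem_reverse, inv.2 a]
    simp [hsws, PySem.List.mem_sorted]
  have hperm : r.Perm (PySem.Set.ofList flat) := by
    rw [List.perm_ext_iff_of_nodup (hrpw.imp ne_of_lt) (PySem.Set.nodup_ofList flat)]
    intro a
    rw [hrmem a, PySem.Set.mem_ofList]
  have hmain : PySem.List.sorted (PySem.Set.ofList flat) (fun x => x) false = r :=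
    PySem.List.sorted_eq_of_perm_of_pairwise_lt _ _ _ hperm hrpw
  simp only [hA, hmain]
  rfl
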